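-- pv_equiv track=rewrite | github.com/manny-security/Python | is_odd_string.py | is_odd_string
-- ===== SOURCE A (Python) =====
-- import string
--
-- def is_odd_string(a_string):
--     alphabet_dict = {}
--     number_value = []
--     alphabet_key = []
--     total = 0
--
--     for char in string.ascii_lowercase:
--         alphabet_key.append(char)
--
--     for n in range(1,27):
--         number_value.append(n)
--
--     for key,value in zip(alphabet_key,number_value):
--         alphabet_dict[key] = value
--
--
--     #sums all values
--     for i in list(a_string):
--         total += alphabet_dict[i]
--
--     #check for odd
--     if total % 2:
--         return True
--
--     return False
-- ===== SOURCE B (Python) =====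
-- import string
--
--
-- def is_odd_string(a_string):
--     alphabet_dict = {c: i for i, c in enumerate(string.ascii_lowercase, 1)}
--     counts = {}
--     for ch in a_string:
--         counts[ch] = counts.get(ch, 0) + 1
--     total = 0
--     for ch, cnt in counts.items():
--         total += alphabet_dict[ch] * cnt
--     return bool(total % 2)
-- ===== Notes on version B (the rewrite author's own statement) =====
-- stated objective: alternative
-- what changed: B builds a frequency table of the string in one pass and computes the parity as a count-weighted sum over the distinct characters, instead of A's per-character accumulation over the whole string (A also builds its alphabet map with three preparatory loops and zip; B uses a single enumerate comprehension).
import Mathlib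
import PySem

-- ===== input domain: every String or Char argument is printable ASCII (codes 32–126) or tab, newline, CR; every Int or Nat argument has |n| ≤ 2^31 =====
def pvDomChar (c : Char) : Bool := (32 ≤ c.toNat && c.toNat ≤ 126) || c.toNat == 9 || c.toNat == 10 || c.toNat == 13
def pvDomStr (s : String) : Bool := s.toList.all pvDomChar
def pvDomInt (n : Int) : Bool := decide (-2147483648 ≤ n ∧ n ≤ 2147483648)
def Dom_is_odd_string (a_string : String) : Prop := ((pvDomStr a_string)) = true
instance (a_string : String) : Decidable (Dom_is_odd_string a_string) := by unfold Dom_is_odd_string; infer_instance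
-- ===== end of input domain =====

-- B replaces A's per-character accumulation by a frequency table plus a count-weighted sum over the distinct characters (alternative decomposition, same cost).


-- ===== PORT A =====
def is_odd_string (a_string : String) : Bool :=
  let alphabet_dict : PySem.Dict Char Int := PySem.Dict.empty
  let number_value : List Int := []
  let alphabet_key : List Char := []
  let total : Int := 0
  let alphabet_key := "abcdefghijklmnopqrstuvwxyz".toList.foldl (fun acc c => acc ++ [c]) alphabet_key
  let number_value := (PySem.List.pyRange 1 27 1).foldl (fun acc n => acc ++ [n]) number_value
  let alphabet_dict := (List.zip alphabet_key number_value).foldl (fun d kv => d.insert kv.1 kv.2) alphabet_dict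
  -- alphabet_dict[i]: the KeyError on a key not in the dict is excluded by Pre_; getD marks that spot
  let total := a_string.toList.foldl (fun acc i => acc + alphabet_dict.getD i 0) total
  if PySem.Int.mod total 2 ≠ 0 then true else false

-- ===== PORT B =====
def is_odd_string_alt (a_string : String) : Bool :=
  let alphabet_dict : PySem.Dict Char Int :=
    (PySem.List.enumerate "abcdefghijklmnopqrstuvwxyz".toList 1).foldl
      (fun d p => d.insert p.2 p.1) PySem.Dict.empty
  let counts : PySem.Dict Char Int :=
    a_string.toList.foldl (fun d ch => d.insert ch (d.getD ch 0 + 1)) PySem.Dict.empty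
  -- alphabet_dict[ch]: the KeyError on a key not in the dict is excluded by Pre_; getD marks that spot
  let total : Int := counts.items.foldl (fun acc p => acc + alphabet_dict.getD p.1 0 * p.2) 0
  decide (PySem.Int.mod total 2 ≠ 0)

-- ===== PRECONDITION & SPEC =====
-- Pre_ excludes exactly the strings containing a character outside 'a'..'z': there both A and B raise KeyError.
def Pre_is_odd_string (a_string : String) : Prop :=
  a_string.toList.all (fun c => 'a' ≤ c && c ≤ 'z') = true
instance (a_string : String) : Decidable (Pre_is_odd_string a_string) := by unfold Pre_is_odd_string; infer_instance
def pvWitness_is_odd_string : String := "abc"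

def Spec_is_odd_string (a_string : String) (out : Bool) : Prop := out = is_odd_string_alt a_string
instance (a_string : String) (out : Bool) : Decidable (Spec_is_odd_string a_string out) := by unfold Spec_is_odd_string; infer_instance

-- ===== CLAIM (what is proved, stated in full; the proofs are below) =====
def Claim_equal_is_odd_string : Prop := ∀ (a_string : String), Dom_is_odd_string a_string → Pre_is_odd_string a_string → Spec_is_odd_string a_string (is_odd_string a_string)

-- ===== LEMMAS AND PROOFS =====

-- the two alphabet dicts (A's zip/range build, B's enumerate build) are the same closed value
theorem alpha_dicts_eq :
    (List.zip ("abcdefghijklmnopqrstuvwxyz".toList.foldl (fun acc c => acc ++ [c]) [])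
        ((PySem.List.pyRange 1 27 1).foldl (fun acc n => acc ++ [n]) [])).foldl
        (fun (d : PySem.Dict Char Int) kv => d.insert kv.1 kv.2) PySem.Dict.empty
      = (PySem.List.enumerate "abcdefghijklmnopqrstuvwxyz".toList 1).foldl
        (fun d p => d.insert p.2 p.1) PySem.Dict.empty := by decide

-- summing an x-indicator over a nodup list containing x picks out f x
theorem sum_map_indicator (f : Char → Int) (K : List Char) (x : Char)
    (hnd : K.Nodup) (hx : x ∈ K) :
    (K.map (fun k => if k = x then f k else 0)).sum = f x := by
  induction K with
  | nil => cases hx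
  | cons a K ih =>
    rcases List.nodup_cons.mp hnd with ⟨ha, hnd'⟩
    simp only [List.map_cons, List.sum_cons]
    by_cases h : a = x
    · subst h
      have hz : (K.map (fun k => if k = a then f k else 0)).sum = 0 := by
        apply List.sum_eq_zero
        intro y hy
        rcases List.mem_map.mp hy with ⟨k, hk, rfl⟩
        have hka : k ≠ a := fun h' => ha (h' ▸ hk)
        simp [hka]
      simp [hz]
    · have hx' : x ∈ K := by
        rcases List.mem_cons.mp hx with h' | h'
        · exact absurd h'.symm h
        · exact h'
      rw [if_neg h, ih hnd' hx', zero_add]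

-- a count-weighted sum over any nodup list covering l equals the per-element sum over l
theorem weighted_sum_eq (f : Char → Int) (l K : List Char)
    (hnd : K.Nodup) (hcov : ∀ x ∈ l, x ∈ K) :
    (K.map (fun k => f k * (l.count k : Int))).sum = (l.map f).sum := by
  induction l with
  | nil => simp
  | cons x l ih =>
    have hx : x ∈ K := hcov x List.mem_cons_self
    have hmap : K.map (fun k => f k * ((x :: l).count k : Int))
        = K.map (fun k => f k * (l.count k : Int) + (if k = x then f k else 0)) := by
      apply List.map_congr_left
      intro k _
      by_cases h : k = x
      · subst h
        rw [List.count_cons_self, if_pos rfl]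
        push_cast; ring
      · simp only [List.count_cons, h]
        simp
        exact Or.inl (fun h' => h h'.symm)
    rw [hmap, List.sum_map_add, sum_map_indicator f K x hnd hx,
        ih (fun y hy => hcov y (List.mem_cons_of_mem x hy))]
    simp [add_comm]

-- ===== VERDICT (by name: the statement is the Claim_ definition above) =====
theorem is_odd_string_spec : Claim_equal_is_odd_string := by
  intro s _ _
  show is_odd_string s = is_odd_string_alt s
  unfold is_odd_string is_odd_string_alt
  simp only [alpha_dicts_eq, PySem.Dict.foldl_insert_getD_add_one_eq_counter,
    PySem.Dict.items_counter, List.foldl_map, PySem.List.foldl_add, zero_add]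
  set d := (PySem.List.enumerate "abcdefghijklmnopqrstuvwxyz".toList 1).foldl
      (fun d p => d.insert p.2 p.1) PySem.Dict.empty with hd
  have hsum : ((PySem.Set.ofList s.toList).map
        (fun k => d.getD k 0 * ((s.toList.count k : Nat) : Int))).sum
      = (s.toList.map (fun i => d.getD i 0)).sum := by
    exact weighted_sum_eq (fun k => d.getD k 0) s.toList (PySem.Set.ofList s.toList)
      (PySem.Set.nodup_ofList s.toList)
      (fun x hx => (PySem.Set.mem_ofList s.toList x).mpr hx)
  rw [hsum]
  simp
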